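-- pv_equiv track=rewrite | github.com/ZephronCoder/distil | api/routes/chat.py | _detect_repeated_line_run
-- ===== SOURCE A (Python) =====
-- def _detect_repeated_line_run(text: str) -> bool:
--     lines = [ln.strip().lower() for ln in (text or "").splitlines() if ln.strip()]
--     if len(lines) < 4:
--         return False
--     seen = {}
--     for line in lines:
--         if len(line) < 18:
--             continue
--         seen[line] = seen.get(line, 0) + 1
--         if seen[line] >= 3:
--             return True
--     return False
-- ===== SOURCE B (Python) =====
-- def _detect_repeated_line_run(text: str) -> bool:
--     lines = [ln.strip().lower() for ln in (text or "").splitlines() if ln.strip()]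
--     if len(lines) < 4:
--         return False
--     longs = sorted(l for l in lines if len(l) >= 18)
--     prev = None
--     run = 0
--     for l in longs:
--         run = run + 1 if l == prev else 1
--         prev = l
--         if run >= 3:
--             return True
--     return False
-- ===== Notes on version B (the rewrite author's own statement) =====
-- stated objective: alternative
-- what changed: replaces the streaming hash-map counter (dict of counts with early exit on reaching 3) by sort-then-scan: the long lines are sorted and a single pass tracks the length of the current run of consecutive equal entries
import Mathlib
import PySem

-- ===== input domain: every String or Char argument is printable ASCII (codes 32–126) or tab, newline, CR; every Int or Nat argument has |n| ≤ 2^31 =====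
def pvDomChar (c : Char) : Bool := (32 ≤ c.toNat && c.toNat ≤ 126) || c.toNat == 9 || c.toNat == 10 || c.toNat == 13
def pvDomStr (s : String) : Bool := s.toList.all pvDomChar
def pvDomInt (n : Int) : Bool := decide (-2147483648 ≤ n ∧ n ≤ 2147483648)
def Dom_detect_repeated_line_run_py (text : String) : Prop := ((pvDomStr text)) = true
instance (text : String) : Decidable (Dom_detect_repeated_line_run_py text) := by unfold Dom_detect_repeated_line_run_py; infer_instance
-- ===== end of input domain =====

-- B replaces A's streaming dict counter by sort-then-scan over the long lines (alternative
-- decomposition, same preprocessing and guard); return values proved equal on all inputs.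

-- ===== PORT A =====
-- lines = [ln.strip().lower() for ln in (text or "").splitlines() if ln.strip()]
-- (identical preprocessing line in A and B, so shared)
def pvLines (text : String) : List String :=
  ((PySem.Str.splitlines text).filter
      (fun ln => !(PySem.Str.strip ln == ""))).map
    (fun ln => PySem.Str.lower (PySem.Str.strip ln))

-- the 'for line in lines' loop with dict 'seen' and early return
def pvLoopA : List String → PySem.Dict String Int → Bool
  | [], _ => false
  | line :: rest, seen =>
    if PySem.Str.len line < 18 then pvLoopA rest seen
    else
      let seen' := seen.insert line (seen.getD line 0 + 1)
      if 3 ≤ seen'.getD line 0 then true else pvLoopA rest seen'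

def detect_repeated_line_run_py (text : String) : Bool :=
  let lines := pvLines text
  if lines.length < 4 then false
  else pvLoopA lines PySem.Dict.empty

-- ===== PORT B =====
-- single pass over the sorted long lines, tracking the current run length
def pvRunScan : List String → Option String → Int → Bool
  | [], _, _ => false
  | l :: rest, prev, run =>
    let run' := if some l == prev then run + 1 else 1
    if 3 ≤ run' then true else pvRunScan rest (some l) run'

def detect_repeated_line_run_py_alt (text : String) : Bool :=
  let lines := pvLines text
  if lines.length < 4 then false
  else
    pvRunScan
      (PySem.List.sorted (lines.filter (fun l => 18 ≤ PySem.Str.len l)) (fun x => x) false)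
      none 0

-- ===== PRECONDITION & SPEC =====
def Spec_detect_repeated_line_run_py (text : String) (out : Bool) : Prop := out = detect_repeated_line_run_py_alt text
instance (text : String) (out : Bool) : Decidable (Spec_detect_repeated_line_run_py text out) := by unfold Spec_detect_repeated_line_run_py; infer_instance

-- ===== CLAIM (what is proved, stated in full; the proofs are below) =====
def Claim_equal_detect_repeated_line_run_py : Prop := ∀ (text : String), Dom_detect_repeated_line_run_py text → Spec_detect_repeated_line_run_py text (detect_repeated_line_run_py text)

-- ===== LEMMAS AND PROOFS =====

-- A's loop returns true iff some string's pending count reaches 3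
theorem pvLoopA_spec (rest : List String) (seen : PySem.Dict String Int)
    (hlt : ∀ s, seen.getD s 0 < 3) :
    (pvLoopA rest seen = true ↔
      ∃ s, 3 ≤ seen.getD s 0 + ((rest.filter (fun l => 18 ≤ PySem.Str.len l)).count s : Int)) := by
  induction rest generalizing seen with
  | nil =>
    simp only [pvLoopA, List.filter_nil, List.count_nil]
    constructor
    · intro h; exact absurd h (by simp)
    · rintro ⟨s, hsle⟩; exact absurd (hlt s) (by omega)
  | cons line rest ih =>
    by_cases hshort : line.length < 18
    · rw [show pvLoopA (line :: rest) seen = pvLoopA rest seen from by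
        simp [pvLoopA, hshort]]
      rw [ih seen hlt]
      have hf : (line :: rest).filter (fun l => 18 ≤ PySem.Str.len l)
          = rest.filter (fun l => 18 ≤ PySem.Str.len l) := by
        simp [show ¬ (18 ≤ line.length) from by omega]
      rw [hf]
    · have hlong : 18 ≤ line.length := by omega
      have hf : (line :: rest).filter (fun l => 18 ≤ PySem.Str.len l)
          = line :: rest.filter (fun l => 18 ≤ PySem.Str.len l) := by
        simp [hlong]
      set seen' := seen.insert line (seen.getD line 0 + 1) with hseen'
      have hself : seen'.getD line 0 = seen.getD line 0 + 1 := by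
        rw [hseen', PySem.Dict.getD_insert]; simp
      have hother : ∀ s, s ≠ line → seen'.getD s 0 = seen.getD s 0 := by
        intro s hne
        rw [hseen', PySem.Dict.getD_insert]; simp [hne]
      by_cases hhit : 3 ≤ seen'.getD line 0
      · rw [show pvLoopA (line :: rest) seen = true from by
          simp [pvLoopA, hshort, ← hseen', hhit]]
        simp only [true_iff]
        refine ⟨line, ?_⟩
        rw [hf, List.count_cons_self]
        have := hself
        push_cast
        omega
      · rw [show pvLoopA (line :: rest) seen = pvLoopA rest seen' from by
          simp [pvLoopA, hshort, ← hseen', hhit]]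
        have hlt' : ∀ s, seen'.getD s 0 < 3 := by
          intro s
          by_cases hsl : s = line
          · subst hsl; omega
          · rw [hother s hsl]; exact hlt s
        rw [ih seen' hlt']
        rw [hf]
        constructor
        · rintro ⟨s, hsle⟩
          refine ⟨s, ?_⟩
          by_cases hsl : s = line
          · subst hsl
            rw [List.count_cons_self]
            rw [hself] at hsle
            omega
          · rw [List.count_cons_of_ne (fun h => hsl h.symm)]
            rw [hother s hsl] at hsle; exact hsle
        · rintro ⟨s, hsle⟩
          refine ⟨s, ?_⟩
          by_cases hsl : s = line
          · subst hsl
            rw [List.count_cons_self] at hsle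
            rw [hself]
            omega
          · rw [List.count_cons_of_ne (fun h => hsl h.symm)] at hsle
            rw [hother s hsl]; exact hsle

-- B's run scan on a sorted list finds a run of 3 iff some element has count ≥ 3
theorem pvRunScan_some_spec (ys : List String) (c : String) (run : Int)
    (hs : ys.Pairwise (· ≤ ·)) (hge : ∀ y ∈ ys, c ≤ y) (hr0 : 0 ≤ run) (hr : run < 3) :
    (pvRunScan ys (some c) run = true ↔
      3 ≤ run + (ys.count c : Int) ∨ ∃ s, s ≠ c ∧ 3 ≤ ys.count s) := by
  induction ys generalizing c run with
  | nil =>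
    simp only [pvRunScan, List.count_nil]
    constructor
    · intro h; exact absurd h (by simp)
    · rintro (h | ⟨s, _, hs3⟩) <;> omega
  | cons y rest ih =>
    have hrest : rest.Pairwise (· ≤ ·) := hs.tail
    by_cases hyc : y = c
    · subst hyc
      rw [show pvRunScan (y :: rest) (some y) run = (if 3 ≤ run + 1 then true else pvRunScan rest (some y) (run + 1)) from by
        simp [pvRunScan]]
      by_cases hhit : 3 ≤ run + 1
      · simp only [hhit, if_true, true_iff]
        left
        have : 1 ≤ ((y :: rest).count y : Int) := by
          rw [List.count_cons_self]; push_cast; omega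
        omega
      · rw [if_neg hhit,
          ih y (run + 1) hrest (fun z hz => List.rel_of_pairwise_cons hs hz) (by omega) (by omega)]
        rw [List.count_cons_self]
        constructor
        · rintro (h1 | ⟨s, hsne, hs3⟩)
          · left; omega
          · right; exact ⟨s, hsne, le_trans hs3 (by
              rw [List.count_cons_of_ne (fun h => hsne h.symm)])⟩
        · rintro (h1 | ⟨s, hsne, hs3⟩)
          · left; omega
          · right; refine ⟨s, hsne, ?_⟩
            rwa [List.count_cons_of_ne (fun h => hsne h.symm)] at hs3
    · have hcy : c < y := lt_of_le_of_ne (hge y (by simp)) (fun h => hyc h.symm)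
      have hcnotin : c ∉ rest := by
        intro hmem
        have := List.rel_of_pairwise_cons hs hmem
        exact absurd this (not_le.mpr hcy)
      have hccount : (y :: rest).count c = 0 := by
        rw [List.count_eq_zero]
        intro hmem
        rcases List.mem_cons.mp hmem with h | h
        · exact hyc h.symm
        · exact hcnotin h
      rw [show pvRunScan (y :: rest) (some c) run = pvRunScan rest (some y) 1 from by
        simp [pvRunScan, hyc]]
      rw [ih y 1 hrest (fun z hz => List.rel_of_pairwise_cons hs hz) (by omega) (by omega)]
      rw [hccount]
      constructor
      · rintro (h1 | ⟨s, hsne, hs3⟩)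
        · right
          refine ⟨y, fun h => hyc h, ?_⟩
          rw [List.count_cons_self]
          omega
        · right
          refine ⟨s, ?_, le_trans hs3 (by
            rw [List.count_cons_of_ne (fun h => hsne h.symm)])⟩
          intro hsc; subst hsc
          exact hcnotin (List.count_pos_iff.mp (by omega))
      · rintro (h1 | ⟨s, hsne, hs3⟩)
        · simp at h1; omega
        · by_cases hsy : s = y
          · subst hsy
            rw [List.count_cons_self] at hs3
            left; omega
          · right
            refine ⟨s, hsy, ?_⟩
            rwa [List.count_cons_of_ne (fun h => hsy h.symm)] at hs3

theorem pvRunScan_none_spec (ys : List String) (hs : ys.Pairwise (· ≤ ·)) :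
    (pvRunScan ys none 0 = true ↔ ∃ s, 3 ≤ ys.count s) := by
  cases ys with
  | nil =>
    simp only [pvRunScan, List.count_nil]
    constructor
    · intro h; exact absurd h (by simp)
    · rintro ⟨s, hs3⟩; omega
  | cons y rest =>
    rw [show pvRunScan (y :: rest) none 0 = pvRunScan rest (some y) 1 from by
      simp [pvRunScan]]
    rw [pvRunScan_some_spec rest y 1 hs.tail
      (fun z hz => List.rel_of_pairwise_cons hs hz) (by omega) (by omega)]
    constructor
    · rintro (h1 | ⟨s, hsne, hs3⟩)
      · refine ⟨y, ?_⟩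
        rw [List.count_cons_self]; omega
      · exact ⟨s, le_trans hs3 (by
          rw [List.count_cons_of_ne (fun h => hsne h.symm)])⟩
    · rintro ⟨s, hs3⟩
      by_cases hsy : s = y
      · subst hsy
        rw [List.count_cons_self] at hs3
        left; omega
      · right
        refine ⟨s, hsy, ?_⟩
        rwa [List.count_cons_of_ne (fun h => hsy h.symm)] at hs3

-- ===== VERDICT (by name: the statement is the Claim_ definition above) =====
theorem detect_repeated_line_run_py_spec : Claim_equal_detect_repeated_line_run_py := by
  intro text _
  unfold Spec_detect_repeated_line_run_py detect_repeated_line_run_py detect_repeated_line_run_py_alt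
  set lines := pvLines text with hlines
  by_cases hlen : lines.length < 4
  · simp [hlen]
  · simp only [hlen, if_false]
    have hA := pvLoopA_spec lines PySem.Dict.empty
      (by intro s; rw [PySem.Dict.getD_empty]; omega)
    have hsorted : (PySem.List.sorted (lines.filter (fun l => 18 ≤ PySem.Str.len l))
        (fun x => x) false).Pairwise (· ≤ ·) := by
      simpa using PySem.List.sorted_pairwise
        (xs := lines.filter (fun l => 18 ≤ PySem.Str.len l)) (key := fun x => x)
    have hB := pvRunScan_none_spec _ hsorted
    have hperm : (PySem.List.sorted (lines.filter (fun l => 18 ≤ PySem.Str.len l))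
        (fun x => x) false).Perm (lines.filter (fun l => 18 ≤ PySem.Str.len l)) :=
      PySem.List.sorted_perm _ _ _
    rw [Bool.eq_iff_iff, hA, hB]
    constructor
    · rintro ⟨s, h3⟩
      refine ⟨s, ?_⟩
      rw [hperm.count_eq s]
      rw [PySem.Dict.getD_empty] at h3
      omega
    · rintro ⟨s, h3⟩
      refine ⟨s, ?_⟩
      rw [PySem.Dict.getD_empty]
      rw [hperm.count_eq s] at h3
      omega
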